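-- pv_equiv track=rewrite | github.com/Bigessfour/Wiley-Widget | scripts/tools/sql_enum_audit_v2.py | split_tuple_fields
-- ===== SOURCE A (Python) =====
-- from typing import Dict, Iterable, List, Optional, Tuple
--
-- def split_tuple_fields(tuple_text: str) -> List[str]:
--     # Remove leading/trailing parentheses
--     text = tuple_text.strip()
--     if text.startswith("(") and text.endswith(")"):
--         text = text[1:-1]
--
--     fields = []
--     cur = []
--     in_single = False
--     i = 0
--     while i < len(text):
--         ch = text[i]
--         if ch == "'":
--             cur.append(ch)
--             # handle escaped single-quote inside string as two single quotes
--             if in_single and i + 1 < len(text) and text[i + 1] == "'":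
--                 cur.append("'")
--                 i += 1
--             else:
--                 in_single = not in_single
--         elif ch == "," and not in_single:
--             fields.append("".join(cur).strip())
--             cur = []
--         else:
--             cur.append(ch)
--         i += 1
--     if cur:
--         fields.append("".join(cur).strip())
--     return fields
-- ===== SOURCE B (Python) =====
-- from typing import List
--
-- def split_tuple_fields(tuple_text: str) -> List[str]:
--     # Two-phase: one pass records top-level comma positions, then the
--     # result is built by slicing the text between successive commas.
--     text = tuple_text.strip()
--     if text.startswith("(") and text.endswith(")"):
--         text = text[1:-1]
--
--     commas = []
--     in_single = False
--     i = 0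
--     n = len(text)
--     while i < n:
--         ch = text[i]
--         if ch == "'":
--             if in_single and i + 1 < n and text[i + 1] == "'":
--                 i += 1  # escaped '' inside a string: skip the pair
--             else:
--                 in_single = not in_single
--         elif ch == "," and not in_single:
--             commas.append(i)
--         i += 1
--
--     fields = []
--     start = 0
--     for p in commas:
--         fields.append(text[start:p].strip())
--         start = p + 1
--     tail = text[start:]
--     if tail:
--         fields.append(tail.strip())
--     return fields
-- ===== Notes on version B (the rewrite author's own statement) =====
-- stated objective: alternative
-- what changed: B replaces A's char-by-char field-accumulator loop (append each char to a list, ''.join + strip at each comma) with a two-phase decomposition: one pass records the positions of top-level commas using the same quote/escape state machine, then the fields are produced by slicing the text between successive comma positions and stripping each slice, appending the final slice only if non-empty.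
import Mathlib
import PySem

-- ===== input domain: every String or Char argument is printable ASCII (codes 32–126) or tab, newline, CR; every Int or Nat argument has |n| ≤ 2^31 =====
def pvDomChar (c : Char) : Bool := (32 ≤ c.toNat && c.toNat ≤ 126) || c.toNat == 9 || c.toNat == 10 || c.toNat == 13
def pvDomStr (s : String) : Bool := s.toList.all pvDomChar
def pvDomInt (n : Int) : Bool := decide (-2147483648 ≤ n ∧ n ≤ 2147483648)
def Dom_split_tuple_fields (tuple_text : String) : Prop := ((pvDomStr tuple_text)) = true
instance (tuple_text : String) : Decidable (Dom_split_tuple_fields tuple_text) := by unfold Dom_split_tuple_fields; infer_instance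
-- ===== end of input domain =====

-- B records top-level comma positions in one pass and then slices the text between them,
-- instead of A's per-char accumulator loop (join+strip per field); objective: alternative decomposition.

-- ===== PORT A =====
-- preprocessing shared verbatim by A and B: strip, then remove one pair of
-- enclosing parentheses (text[1:-1]); both Pythons begin with these same lines.
def pvPrep (tuple_text : String) : List Char :=
  let text := PySem.Chars.strip tuple_text.toList
  if PySem.Chars.startswith text ['('] && PySem.Chars.endswith text [')'] then
    PySem.List.slice text (some 1) (some (-1))
  else text

-- A's while loop over indices, ported as recursion over the remaining characters:
-- text[i] is the head, text[i+1] is rest.head? (exact for this sequential left-to-right scan).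
def pvLoopA : List Char → List Char → Bool → List String → List String
  | [], cur, _, fields =>
      if cur.isEmpty then fields else fields ++ [String.ofList (PySem.Chars.strip cur)]
  | c :: rest, cur, in_single, fields =>
      if c = '\'' then
        if in_single = true ∧ rest.head? = some '\'' then
          pvLoopA rest.tail (cur ++ [c, '\'']) in_single fields
        else
          pvLoopA rest (cur ++ [c]) (!in_single) fields
      else if c = ',' ∧ in_single = false then
        pvLoopA rest [] in_single (fields ++ [String.ofList (PySem.Chars.strip cur)])
      else
        pvLoopA rest (cur ++ [c]) in_single fields
termination_by rest _ _ _ => rest.length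
decreasing_by all_goals simp [List.length_tail]

def split_tuple_fields (tuple_text : String) : List String :=
  pvLoopA (pvPrep tuple_text) [] false []

-- ===== PORT B =====
-- pass 1: positions of top-level commas (i is the running index of B's while loop;
-- in the escaped-quote branch B advances i by 2, skipping the pair).
def pvCommas : List Char → Nat → Bool → List Nat
  | [], _, _ => []
  | c :: rest, i, in_single =>
      if c = '\'' then
        if in_single = true ∧ rest.head? = some '\'' then
          pvCommas rest.tail (i + 2) in_single
        else
          pvCommas rest (i + 1) (!in_single)
      else if c = ',' ∧ in_single = false then
        i :: pvCommas rest (i + 1) in_single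
      else
        pvCommas rest (i + 1) in_single
termination_by rest _ _ => rest.length
decreasing_by all_goals simp [List.length_tail]

-- pass 2: B's for-loop over the comma positions; text[start:p] with 0 ≤ start ≤ p is
-- (drop start).take (p - start) (= PySem.List.slice_natCast), text[start:] is drop start.
def pvBuild (t : List Char) : Nat → List Nat → List String
  | start, [] =>
      if (t.drop start).isEmpty then [] else [String.ofList (PySem.Chars.strip (t.drop start))]
  | start, p :: ps =>
      String.ofList (PySem.Chars.strip ((t.drop start).take (p - start))) :: pvBuild t (p + 1) ps

def split_tuple_fields_alt (tuple_text : String) : List String :=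
  let t := pvPrep tuple_text
  pvBuild t 0 (pvCommas t 0 false)

-- ===== PRECONDITION & SPEC =====
def Spec_split_tuple_fields (tuple_text : String) (out : List String) : Prop := out = split_tuple_fields_alt tuple_text
instance (tuple_text : String) (out : List String) : Decidable (Spec_split_tuple_fields tuple_text out) := by unfold Spec_split_tuple_fields; infer_instance

-- ===== CLAIM (what is proved, stated in full; the proofs are below) =====
def Claim_equal_split_tuple_fields : Prop := ∀ (tuple_text : String), Dom_split_tuple_fields tuple_text → Spec_split_tuple_fields tuple_text (split_tuple_fields tuple_text)

-- ===== LEMMAS AND PROOFS =====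

-- invariant: if the unprocessed suffix of t from `start` is cur ++ rest, then A's loop from
-- this state yields fields ++ (B's slices of t from start at the top-level commas of rest).
theorem pvLoop_eq_build (rest cur : List Char) (in_single : Bool) (fields : List String) :
    ∀ (t : List Char) (start : Nat), t.drop start = cur ++ rest →
    pvLoopA rest cur in_single fields
      = fields ++ pvBuild t start (pvCommas rest (start + cur.length) in_single) := by
  induction rest, cur, in_single, fields using pvLoopA.induct with
  | case1 cur s fields hc =>
      intro t start h
      have hc' : cur = [] := by simpa using hc
      subst hc'
      simp only [List.nil_append] at h
      simp [pvLoopA, pvCommas, pvBuild, h, hc]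
  | case2 cur s fields hc =>
      intro t start h
      simp only [List.append_nil] at h
      simp [pvLoopA, pvCommas, pvBuild, h, hc]
  | case3 rest cur s fields hesc ih =>
      intro t start h
      obtain ⟨hs, hh⟩ := hesc
      cases rest with
      | nil => simp at hh
      | cons d rest' =>
        simp only [List.head?_cons, Option.some.injEq] at hh
        subst hh hs
        have h' : t.drop start = (cur ++ ['\'', '\'']) ++ rest' := by simpa using h
        have hrec := ih t start h'
        simp only [List.tail_cons] at hrec
        have e : start + (cur ++ ['\'', '\'']).length = start + cur.length + 2 := by
          simp [List.length_append]; omega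
        rw [e] at hrec
        rw [pvLoopA, pvCommas]
        simp only [List.head?_cons, List.tail_cons]
        simpa using hrec
  | case4 rest cur s fields hesc ih =>
      intro t start h
      have h' : t.drop start = (cur ++ ['\'']) ++ rest := by simpa using h
      have hrec := ih t start h'
      have e : start + (cur ++ ['\'']).length = start + cur.length + 1 := by
        simp [List.length_append]; omega
      rw [e] at hrec
      rw [pvLoopA, pvCommas]
      simp only [if_neg hesc]
      exact hrec
  | case5 c rest cur s fields hq hc ih =>
      obtain ⟨hc1, hc2⟩ := hc
      subst hc1 hc2
      intro t start h
      have h' : t.drop (start + cur.length + 1) = [] ++ rest := by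
        rw [show start + cur.length + 1 = start + (cur.length + 1) from by omega,
            ← List.drop_drop, h,
            show cur ++ ',' :: rest = (cur ++ [',']) ++ rest from by simp,
            List.drop_left' (by simp : (cur ++ [',']).length = cur.length + 1)]
        simp
      have hrec := ih t (start + cur.length + 1) h'
      simp only [List.length_nil, Nat.add_zero] at hrec
      have htake : (t.drop start).take cur.length = cur := by
        rw [h]; exact List.take_left' rfl
      rw [pvLoopA, pvCommas]
      simp only [and_self, if_true, if_neg hq]
      rw [hrec]
      simp [pvBuild, htake]
  | case6 c rest cur s fields hq hc ih =>
      intro t start h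
      have h' : t.drop start = (cur ++ [c]) ++ rest := by simpa using h
      have hrec := ih t start h'
      have e : start + (cur ++ [c]).length = start + cur.length + 1 := by
        simp [List.length_append]; omega
      rw [e] at hrec
      rw [pvLoopA, pvCommas]
      simp only [if_neg hq, if_neg hc]
      exact hrec

-- ===== VERDICT (by name: the statement is the Claim_ definition above) =====
theorem split_tuple_fields_spec : Claim_equal_split_tuple_fields := by
  intro s _
  unfold Spec_split_tuple_fields split_tuple_fields split_tuple_fields_alt
  have := pvLoop_eq_build (pvPrep s) [] false [] (pvPrep s) 0 (by simp)
  simpa using this
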